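-- pv_equiv track=rewrite | github.com/topherjaynes/AdventCode | Day8/day8a.py | solve
-- ===== SOURCE A (Python) =====
-- from collections import defaultdict
-- from itertools import combinations
--
-- def parse_grid(input_text):
--     """Parse the grid and return dictionary of frequencies to positions."""
--     antennas = defaultdict(list)
--     lines = input_text.strip().split('\n')
--     for y, line in enumerate(lines):
--         for x, char in enumerate(line):
--             if char != '.':
--                 antennas[char].append((x, y))
--     return antennas, len(lines), len(lines[0])
--
-- def is_collinear(p1, p2, p3, epsilon=1e-10):
--     """
--     Check if three points are collinear using the area method.
--     Returns True if points form a line (area of triangle is approximately 0).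
--     """
--     area = abs(p1[0]*(p2[1] - p3[1]) + p2[0]*(p3[1] - p1[1]) + p3[0]*(p1[1] - p2[1]))
--     return area < epsilon
--
-- def find_antinodes(antenna1, antenna2, max_x, max_y):
--     """
--     Find all antinodes for a pair of antennas by checking every grid position.
--     Now checks the entire grid as antinodes can appear beyond antenna positions.
--     """
--     antinodes = set()
--
--     # Add antenna positions themselves as antinodes
--     antinodes.add(antenna1)
--     antinodes.add(antenna2)
--
--     # Check every point in the grid
--     for y in range(max_y):
--         for x in range(max_x):
--             point = (x, y)
--             if point != antenna1 and point != antenna2: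
--                 if is_collinear(point, antenna1, antenna2):
--                     antinodes.add(point)
--
--     return antinodes
--
-- def solve(input_text):
--     """Find total number of unique antinode locations."""
--     antennas, max_y, max_x = parse_grid(input_text)
--     all_antinodes = set()
--
--     # For each frequency with at least 2 antennas
--     for freq, positions in antennas.items():
--         if len(positions) < 2:
--             continue
--
--         # Check each pair of antennas of the same frequency
--         for ant1, ant2 in combinations(positions, 2):
--             antinodes = find_antinodes(ant1, ant2, max_x, max_y)
--             all_antinodes.update(antinodes)
--
--     return len(all_antinodes)
-- ===== SOURCE B (Python) =====
-- from itertools import combinations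
--
--
-- def _clip(a, u, size, lo, hi):
--     """Tighten [lo, hi] to the k with 0 <= a + k*u < size (no-op when u == 0)."""
--     if u > 0:
--         return max(lo, -(a // u)), min(hi, (size - 1 - a) // u)
--     if u < 0:
--         return max(lo, -((size - 1 - a) // (-u))), min(hi, a // (-u))
--     return lo, hi
--
--
-- def _gcd(a, b):
--     while b:
--         a, b = b, a % b
--     return abs(a)
--
--
-- def solve(input_text):
--     """Count unique antinode cells by walking each pair's line in gcd-reduced steps."""
--     lines = input_text.strip().split('\n')
--     max_y = len(lines)
--     max_x = len(lines[0])
--     antennas = {}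
--     for y, line in enumerate(lines):
--         for x, ch in enumerate(line):
--             if ch != '.':
--                 antennas.setdefault(ch, []).append((x, y))
--     found = set()
--     for positions in antennas.values():
--         for (ax, ay), (bx, by) in combinations(positions, 2):
--             found.add((ax, ay))
--             found.add((bx, by))
--             g = _gcd(bx - ax, by - ay)
--             ux = (bx - ax) // g
--             uy = (by - ay) // g
--             bound = max_x + max_y + abs(ax) + abs(ay)
--             lo, hi = _clip(ax, ux, max_x, -bound, bound)
--             lo, hi = _clip(ay, uy, max_y, lo, hi)
--             for k in range(lo, hi + 1):
--                 px = ax + k * ux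
--                 py = ay + k * uy
--                 if 0 <= px < max_x and 0 <= py < max_y:
--                     found.add((px, py))
--     return len(found)
-- ===== Notes on version B (the rewrite author's own statement) =====
-- stated objective: faster
-- what changed: Instead of testing every grid cell of the W*H grid for collinearity with each antenna pair, B walks each pair's line in gcd-reduced integer steps, enumerating only the O(W+H) lattice points on that line.
import Mathlib
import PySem

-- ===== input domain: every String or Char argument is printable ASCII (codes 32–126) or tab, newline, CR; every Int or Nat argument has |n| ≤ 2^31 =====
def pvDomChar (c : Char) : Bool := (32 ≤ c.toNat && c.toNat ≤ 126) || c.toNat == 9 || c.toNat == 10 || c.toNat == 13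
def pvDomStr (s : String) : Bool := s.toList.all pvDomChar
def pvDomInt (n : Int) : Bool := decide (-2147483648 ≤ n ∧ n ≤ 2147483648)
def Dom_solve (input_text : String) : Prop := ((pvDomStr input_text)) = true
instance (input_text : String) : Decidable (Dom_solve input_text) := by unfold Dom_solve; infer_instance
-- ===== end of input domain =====

-- B replaces A's per-pair scan of the whole W×H grid by a walk along the pair's
-- line in gcd-reduced integer steps (O(W+H) per pair instead of O(W*H)); measured faster.

-- ===== PORT A =====

-- is_collinear: the integer area is compared with the float 1e-10; since the area is a
-- nonnegative integer, 'area < 1e-10' holds exactly when area = 0 (exact port).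
def pvIsCollinear (p1 p2 p3 : Int × Int) : Bool :=
  let area := |p1.1 * (p2.2 - p3.2) + p2.1 * (p3.2 - p1.2) + p3.1 * (p1.2 - p2.2)|
  area == 0

-- find_antinodes
def pvFindAntinodes (antenna1 antenna2 : Int × Int) (max_x max_y : Int) :
    PySem.Set (Int × Int) :=
  let antinodes : PySem.Set (Int × Int) :=
    PySem.Set.add (PySem.Set.add PySem.Set.empty antenna1) antenna2
  (PySem.List.pyRange 0 max_y 1).foldl (fun antinodes y =>
    (PySem.List.pyRange 0 max_x 1).foldl (fun antinodes x =>
      if (x, y) ≠ antenna1 ∧ (x, y) ≠ antenna2 then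
        if pvIsCollinear (x, y) antenna1 antenna2 then PySem.Set.add antinodes (x, y)
        else antinodes
      else antinodes) antinodes) antinodes

-- parse_grid; 'split' with the nonempty separator '\n' always returns at least one piece,
-- so the '.getD []' never fires and 'pyGetD lines 0 ""' is exactly lines[0].
def pvParseGrid (input_text : String) :
    PySem.Dict Char (List (Int × Int)) × Int × Int :=
  let lines := (PySem.Str.split? (PySem.Str.strip input_text) "\n").getD []
  let antennas := (PySem.List.enumerate lines).foldl (fun antennas yl =>
      (PySem.List.enumerate yl.2.toList).foldl (fun antennas xc =>
        if xc.2 ≠ '.' then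
          antennas.insert xc.2 (antennas.getD xc.2 [] ++ [(xc.1, yl.1)])
        else antennas) antennas) PySem.Dict.empty
  (antennas, PySem.List.len lines, PySem.Str.len (PySem.List.pyGetD lines 0 ""))

-- the loop-header tuple unpacking 'for ant1, ant2 in combinations(positions, 2)' as a named step
def pvPairLoopA (max_x max_y : Int) (all_antinodes : PySem.Set (Int × Int))
    (pair : List (Int × Int)) : PySem.Set (Int × Int) :=
  match pair with
  | [ant1, ant2] =>
      PySem.Set.update all_antinodes (pvFindAntinodes ant1 ant2 max_x max_y)
  | _ => all_antinodes

def solve (input_text : String) : Int :=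
  let r := pvParseGrid input_text
  let antennas := r.1
  let max_y := r.2.1
  let max_x := r.2.2
  let all_antinodes : PySem.Set (Int × Int) :=
    antennas.items.foldl (fun all_antinodes fp =>
      if PySem.List.len fp.2 < 2 then all_antinodes
      else (PySem.List.combinations fp.2 2).foldl (fun all_antinodes pair =>
        pvPairLoopA max_x max_y all_antinodes pair) all_antinodes) PySem.Set.empty
  PySem.Set.len all_antinodes

-- ===== PORT B =====

-- termination helper for pvGcd (Euclid's loop in Source B)
theorem pvModAbsLt (a b : Int) (hb : b ≠ 0) : (PySem.Int.mod a b).natAbs < b.natAbs := by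
  rcases lt_or_gt_of_ne hb with h | h
  · have := PySem.Int.mod_neg_bounds a h
    omega
  · have h1 := PySem.Int.mod_nonneg a h
    have h2 := PySem.Int.mod_lt a h
    omega

-- _gcd: Euclid's loop, then abs
def pvGcd (a b : Int) : Int :=
  if h : b = 0 then |a| else pvGcd b (PySem.Int.mod a b)
termination_by b.natAbs
decreasing_by exact pvModAbsLt a b h

-- _clip: tighten [lo, hi] to the k with 0 <= a + k*u < size (no-op when u == 0)
def pvClip (a u size lo hi : Int) : Int × Int :=
  if u > 0 then
    (max lo (-(PySem.Int.floordiv a u)), min hi (PySem.Int.floordiv (size - 1 - a) u))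
  else if u < 0 then
    (max lo (-(PySem.Int.floordiv (size - 1 - a) (-u))), min hi (PySem.Int.floordiv a (-u)))
  else (lo, hi)

-- the loop-header tuple unpacking 'for (ax, ay), (bx, by) in combinations(positions, 2)' as a named step
def pvPairLoopB (max_x max_y : Int) (found : PySem.Set (Int × Int))
    (pair : List (Int × Int)) : PySem.Set (Int × Int) :=
  match pair with
  | [(ax, ay), (bx, b2y)] =>
      let found := PySem.Set.add found (ax, ay)
      let found := PySem.Set.add found (bx, b2y)
      let g := pvGcd (bx - ax) (b2y - ay)
      let ux := PySem.Int.floordiv (bx - ax) g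
      let uy := PySem.Int.floordiv (b2y - ay) g
      let bound := max_x + max_y + |ax| + |ay|
      let lh := pvClip ax ux max_x (-bound) bound
      let lh2 := pvClip ay uy max_y lh.1 lh.2
      (PySem.List.pyRange lh2.1 (lh2.2 + 1) 1).foldl (fun found k =>
        let px := ax + k * ux
        let py := ay + k * uy
        if 0 ≤ px ∧ px < max_x ∧ 0 ≤ py ∧ py < max_y then
          PySem.Set.add found (px, py)
        else found) found
  | _ => found

def solve_alt (input_text : String) : Int :=
  let lines := (PySem.Str.split? (PySem.Str.strip input_text) "\n").getD []
  let max_y := PySem.List.len lines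
  let max_x := PySem.Str.len (PySem.List.pyGetD lines 0 "")
  let antennas := (PySem.List.enumerate lines).foldl (fun antennas yl =>
      (PySem.List.enumerate yl.2.toList).foldl (fun antennas xc =>
        if xc.2 ≠ '.' then
          antennas.insert xc.2 (antennas.getD xc.2 [] ++ [(xc.1, yl.1)])
        else antennas) antennas) PySem.Dict.empty
  let found : PySem.Set (Int × Int) :=
    antennas.values.foldl (fun found positions =>
      (PySem.List.combinations positions 2).foldl (fun found pair =>
        pvPairLoopB max_x max_y found pair) found) PySem.Set.empty
  PySem.Set.len found

-- ===== PRECONDITION & SPEC =====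
def Spec_solve (input_text : String) (out : Int) : Prop := out = solve_alt input_text
instance (input_text : String) (out : Int) : Decidable (Spec_solve input_text out) := by unfold Spec_solve; infer_instance

-- ===== CLAIM (what is proved, stated in full; the proofs are below) =====
def Claim_equal_solve : Prop := ∀ (input_text : String), Dom_solve input_text → Spec_solve input_text (solve input_text)

-- ===== LEMMAS AND PROOFS =====

theorem pv_mem_foldl {π τ : Type} (F : List τ → π → List τ) (Q : π → τ → Prop)
    (h : ∀ s x y, y ∈ F s x ↔ y ∈ s ∨ Q x y) :
    ∀ (l : List π) (s : List τ) (y : τ), y ∈ l.foldl F s ↔ y ∈ s ∨ ∃ x ∈ l, Q x y := by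
  intro l
  induction l with
  | nil => simp
  | cons a t ih =>
    intro s y
    simp only [List.foldl_cons, ih, h, List.mem_cons]
    constructor
    · rintro ((hy | hq) | ⟨x, hx, hq⟩)
      · exact .inl hy
      · exact .inr ⟨a, .inl rfl, hq⟩
      · exact .inr ⟨x, .inr hx, hq⟩
    · rintro (hy | ⟨x, hx | hx, hq⟩)
      · exact .inl (.inl hy)
      · subst hx; exact .inl (.inr hq)
      · exact .inr ⟨x, hx, hq⟩

theorem pv_nodup_foldl {π τ : Type} (F : List τ → π → List τ)
    (h : ∀ s x, s.Nodup → (F s x).Nodup) :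
    ∀ (l : List π) (s : List τ), s.Nodup → (l.foldl F s).Nodup := by
  intro l
  induction l with
  | nil => intro s hs; simpa
  | cons a t ih => intro s hs; exact ih _ (h _ _ hs)

theorem pvGcd_eq (a b : Int) : pvGcd a b = (Int.gcd a b : Int) := by
  by_cases hb : b = 0
  · subst hb; rw [pvGcd]; simp only []
    rw [Int.gcd_zero_right]; exact Int.abs_eq_natAbs a
  · rw [pvGcd, dif_neg hb, pvGcd_eq b (PySem.Int.mod a b)]
    have hmod : PySem.Int.mod a b = a - b * PySem.Int.floordiv a b := by
      have := PySem.Int.floordiv_mul_add_mod a b; linarith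
    have hswap : Int.gcd b (a - b * PySem.Int.floordiv a b) = Int.gcd b a := by
      rw [mul_comm]; exact Int.gcd_sub_mul_right_right b a _
    rw [hmod, hswap, Int.gcd_comm b a]
termination_by b.natAbs
decreasing_by exact pvModAbsLt a b hb

theorem pv_core (dx dy : Int) (hne : ¬(dx = 0 ∧ dy = 0)) :
    0 < pvGcd dx dy ∧
    dx = PySem.Int.floordiv dx (pvGcd dx dy) * pvGcd dx dy ∧
    dy = PySem.Int.floordiv dy (pvGcd dx dy) * pvGcd dx dy ∧
    Int.gcd (PySem.Int.floordiv dx (pvGcd dx dy)) (PySem.Int.floordiv dy (pvGcd dx dy)) = 1 := by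
  have hgpos : 0 < Int.gcd dx dy := by
    rcases not_and_or.mp hne with h | h <;> [exact Int.gcd_pos_of_ne_zero_left dy h;
      exact Int.gcd_pos_of_ne_zero_right dx h]
  have hg : pvGcd dx dy = (Int.gcd dx dy : Int) := pvGcd_eq dx dy
  have hgpos' : (0 : Int) < pvGcd dx dy := by rw [hg]; exact_mod_cast hgpos
  have hfx : PySem.Int.floordiv dx (pvGcd dx dy) = dx / (Int.gcd dx dy : Int) := by
    rw [hg]; exact PySem.Int.floordiv_eq_ediv_of_pos (by exact_mod_cast hgpos)
  have hfy : PySem.Int.floordiv dy (pvGcd dx dy) = dy / (Int.gcd dx dy : Int) := by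
    rw [hg]; exact PySem.Int.floordiv_eq_ediv_of_pos (by exact_mod_cast hgpos)
  refine ⟨hgpos', ?_, ?_, ?_⟩
  · rw [hfx, hg, Int.ediv_mul_cancel (Int.gcd_dvd_left dx dy)]
  · rw [hfy, hg, Int.ediv_mul_cancel (Int.gcd_dvd_right dx dy)]
  · rw [hfx, hfy]; exact Int.gcd_div_gcd_div_gcd hgpos

theorem pv_param (dx dy X Y : Int) (hne : ¬(dx = 0 ∧ dy = 0)) :
    X * dy = Y * dx ↔
    ∃ k : Int, X = k * PySem.Int.floordiv dx (pvGcd dx dy) ∧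
               Y = k * PySem.Int.floordiv dy (pvGcd dx dy) := by
  obtain ⟨hg, hdx, hdy, hcop⟩ := pv_core dx dy hne
  set g := pvGcd dx dy
  set ux := PySem.Int.floordiv dx g with hux_def
  set uy := PySem.Int.floordiv dy g with huy_def
  constructor
  · intro h
    have hcancel : X * uy = Y * ux := by
      have : X * uy * g = Y * ux * g := by
        calc X * uy * g = X * (uy * g) := by ring
        _ = X * dy := by rw [← hdy]
        _ = Y * dx := h
        _ = Y * (ux * g) := by rw [← hdx]
        _ = Y * ux * g := by ring
      exact mul_right_cancel₀ (ne_of_gt hg) this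
    by_cases hu : ux = 0
    · have hna : uy.natAbs = 1 := by rw [hu, Int.gcd_zero_left] at hcop; exact hcop
      have huy1 : uy = 1 ∨ uy = -1 := by omega
      have hX0 : X = 0 := by
        have h0 : X * uy = 0 := by rw [hcancel, hu]; ring
        rcases mul_eq_zero.mp h0 with h | h
        · exact h
        · exfalso; omega
      refine ⟨Y * uy, by rw [hX0, hu]; ring, ?_⟩
      rcases huy1 with h | h <;> rw [h] <;> ring
    · have hdvd : ux ∣ X * uy := ⟨Y, by rw [hcancel]; ring⟩
      have hco : IsCoprime ux uy := Int.isCoprime_iff_gcd_eq_one.mpr hcop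
      obtain ⟨c, hc⟩ := hco.dvd_of_dvd_mul_right hdvd
      refine ⟨c, by rw [hc]; ring, ?_⟩
      have : Y * ux = c * uy * ux := by
        calc Y * ux = X * uy := hcancel.symm
        _ = ux * c * uy := by rw [hc]
        _ = c * uy * ux := by ring
      exact mul_right_cancel₀ hu this
  · rintro ⟨k, hX, hY⟩
    rw [hX, hY, hdx, hdy]; ring

theorem pv_coll_iff (px py ax ay bx b2y : Int) :
    pvIsCollinear (px, py) (ax, ay) (bx, b2y) = true ↔
    (px - ax) * (b2y - ay) = (py - ay) * (bx - ax) := by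
  simp only [pvIsCollinear, beq_iff_eq, abs_eq_zero]
  constructor <;> intro h <;> linarith

theorem pv_k_bound (mx my ax ay ux uy k : Int) (hmy : 0 ≤ my) (_hmx : 0 ≤ mx)
    (hu : ¬(ux = 0 ∧ uy = 0))
    (hx1 : 0 ≤ ax + k * ux) (hx2 : ax + k * ux < mx)
    (hy1 : 0 ≤ ay + k * uy) (hy2 : ay + k * uy < my) :
    -(mx + my + |ax| + |ay|) ≤ k ∧ k < (mx + my + |ax| + |ay|) + 1 := by
  have hb : |k| ≤ mx + my + |ax| + |ay| := by
    rcases not_and_or.mp hu with h | h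
    · have hp : 0 < |ux| := abs_pos.mpr h
      have h1 : |k| * 1 ≤ |k| * |ux| :=
        mul_le_mul_of_nonneg_left (by omega) (abs_nonneg k)
      have h2 : |k * ux| = |k| * |ux| := abs_mul k ux
      have h3 : |k * ux| ≤ |ax + k * ux| + |ax| := by
        have := abs_sub (ax + k * ux) ax
        simpa using this
      have h4 : |ax + k * ux| < mx := by rw [abs_of_nonneg hx1]; exact hx2
      have h5 : 0 ≤ |ay| := abs_nonneg ay
      omega
    · have hp : 0 < |uy| := abs_pos.mpr h
      have h1 : |k| * 1 ≤ |k| * |uy| :=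
        mul_le_mul_of_nonneg_left (by omega) (abs_nonneg k)
      have h2 : |k * uy| = |k| * |uy| := abs_mul k uy
      have h3 : |k * uy| ≤ |ay + k * uy| + |ay| := by
        have := abs_sub (ay + k * uy) ay
        simpa using this
      have h4 : |ay + k * uy| < my := by rw [abs_of_nonneg hy1]; exact hy2
      have h5 : 0 ≤ |ax| := abs_nonneg ax
      omega
  have := abs_le.mp hb
  omega

theorem pv_clip_le (a u size lo hi k : Int) (h1 : 0 ≤ a + k * u) (h2 : a + k * u < size)
    (hlo : lo ≤ k) (hhi : k ≤ hi) :
    (pvClip a u size lo hi).1 ≤ k ∧ k ≤ (pvClip a u size lo hi).2 := by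
  unfold pvClip
  split_ifs with hu1 hu2
  · refine ⟨?_, ?_⟩
    · show max lo (-(PySem.Int.floordiv a u)) ≤ k
      have hq : -k ≤ PySem.Int.floordiv a u := by
        rw [PySem.Int.le_floordiv_iff_mul_le hu1]
        linarith
      exact max_le hlo (by linarith)
    · show k ≤ min hi (PySem.Int.floordiv (size - 1 - a) u)
      have hq : k ≤ PySem.Int.floordiv (size - 1 - a) u := by
        rw [PySem.Int.le_floordiv_iff_mul_le hu1]
        linarith
      exact le_min hhi hq
  · refine ⟨?_, ?_⟩
    · show max lo (-(PySem.Int.floordiv (size - 1 - a) (-u))) ≤ k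
      have hq : -k ≤ PySem.Int.floordiv (size - 1 - a) (-u) := by
        rw [PySem.Int.le_floordiv_iff_mul_le (by linarith : (0 : Int) < -u)]
        have e : -k * -u = k * u := by ring
        rw [e]
        linarith
      exact max_le hlo (by linarith)
    · show k ≤ min hi (PySem.Int.floordiv a (-u))
      have hq : k ≤ PySem.Int.floordiv a (-u) := by
        rw [PySem.Int.le_floordiv_iff_mul_le (by linarith : (0 : Int) < -u)]
        have e : k * -u = -(k * u) := by ring
        rw [e]
        linarith
      exact le_min hhi hq
  · exact ⟨hlo, hhi⟩

-- lex order on grid positions: the order in which the parse appends antenna positions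
def pvLex (p q : Int × Int) : Prop := p.2 < q.2 ∨ (p.2 = q.2 ∧ p.1 < q.1)

def pvGood (X Y : Int) (l : List (Int × Int)) : Prop :=
  l.Pairwise pvLex ∧ ∀ p ∈ l, pvLex p (X, Y)

theorem pv_lex_mono {p : Int × Int} {X Y X' Y' : Int} (h : pvLex p (X, Y))
    (hle : Y < Y' ∨ (Y = Y' ∧ X ≤ X')) : pvLex p (X', Y') := by
  obtain ⟨a, b⟩ := p
  unfold pvLex at *
  simp only at *
  omega

theorem pv_vals_insert {κ ν : Type} [BEq κ] (d : PySem.Dict κ ν) (k : κ) (v : ν)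
    (P : ν → Prop) (hd : ∀ kv ∈ d.items, P kv.2) (hv : P v) :
    ∀ kv ∈ (d.insert k v).items, P kv.2 := by
  intro kv hkv
  unfold PySem.Dict.insert at hkv
  split at hkv
  · simp only [List.mem_map] at hkv
    obtain ⟨q, hq, heq⟩ := hkv
    by_cases h : (q.1 == k) = true
    · rw [if_pos h] at heq; rw [← heq]; exact hv
    · rw [if_neg h] at heq; rw [← heq]; exact hd q hq
  · rw [List.mem_append] at hkv
    rcases hkv with h | h
    · exact hd kv h
    · simp only [List.mem_singleton] at h; rw [h]; exact hv

theorem pv_getD_cases {κ ν : Type} [BEq κ] (d : PySem.Dict κ ν) (k : κ) (dflt : ν) :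
    d.getD k dflt = dflt ∨ ∃ kv ∈ d.items, d.getD k dflt = kv.2 := by
  unfold PySem.Dict.getD PySem.Dict.get?
  cases hf : List.find? (fun p => p.1 == k) d.items with
  | none => left; simp
  | some q => right; exact ⟨q, List.mem_of_find?_eq_some hf, by simp⟩

theorem pv_inner_inv (y : Int) :
    ∀ (cs : List Char) (s : Int) (d : PySem.Dict Char (List (Int × Int))),
      (∀ kv ∈ d.items, pvGood s y kv.2) →
      ∀ kv ∈ ((PySem.List.enumerate cs s).foldl (fun antennas xc =>
          if xc.2 ≠ '.' then
            antennas.insert xc.2 (antennas.getD xc.2 [] ++ [(xc.1, y)])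
          else antennas) d).items,
        pvGood (s + cs.length) y kv.2 := by
  intro cs
  induction cs with
  | nil => intro s d hd; simpa [PySem.List.enumerate_nil] using hd
  | cons c t ih =>
    intro s d hd
    rw [PySem.List.enumerate_cons, List.foldl_cons]
    have hstep : ∀ kv ∈ ((if ((s, c).2 ≠ '.') then
          d.insert (s, c).2 (d.getD (s, c).2 [] ++ [((s, c).1, y)])
        else d) : PySem.Dict Char (List (Int × Int))).items, pvGood (s + 1) y kv.2 := by
      have hmono : ∀ kv ∈ d.items, pvGood (s + 1) y kv.2 := by
        intro kv h
        obtain ⟨h1, h2⟩ := hd kv h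
        exact ⟨h1, fun p hp => pv_lex_mono (h2 p hp) (Or.inr ⟨rfl, by omega⟩)⟩
      split
      · apply pv_vals_insert _ _ _ _ hmono
        rcases pv_getD_cases d (s, c).2 ([] : List (Int × Int)) with h | ⟨kv, hkv, h⟩
        · rw [h]
          refine ⟨by simp, ?_⟩
          intro p hp
          simp only [List.nil_append, List.mem_singleton] at hp
          rw [hp]
          exact Or.inr ⟨rfl, by omega⟩
        · rw [h]
          obtain ⟨h1, h2⟩ := hd kv hkv
          constructor
          · rw [List.pairwise_append]
            exact ⟨h1, by simp [pvLex], fun p hp q hq => by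
              simp only [List.mem_singleton] at hq; rw [hq]; exact h2 p hp⟩
          · intro p hp
            rw [List.mem_append] at hp
            rcases hp with hp | hp
            · exact pv_lex_mono (h2 p hp) (Or.inr ⟨rfl, by omega⟩)
            · simp only [List.mem_singleton] at hp; rw [hp]
              exact Or.inr ⟨rfl, by omega⟩
      · exact hmono
    have := ih (s + 1) _ hstep
    have hcast : s + 1 + (t.length : Int) = s + ((t.length : Int) + 1) := by ring
    simpa [hcast, Nat.cast_add] using this

theorem pv_parse_pairwise (lines : List String) :
    ∀ (s : Int) (d : PySem.Dict Char (List (Int × Int))),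
      (∀ kv ∈ d.items, pvGood 0 s kv.2) →
      ∀ kv ∈ ((PySem.List.enumerate lines s).foldl (fun antennas yl =>
          (PySem.List.enumerate yl.2.toList).foldl (fun antennas xc =>
            if xc.2 ≠ '.' then
              antennas.insert xc.2 (antennas.getD xc.2 [] ++ [(xc.1, yl.1)])
            else antennas) antennas) d).items,
        kv.2.Pairwise pvLex := by
  induction lines with
  | nil => intro s d hd kv h; rw [PySem.List.enumerate_nil, List.foldl_nil] at h; exact (hd kv h).1
  | cons ln t ih =>
    intro s d hd
    rw [PySem.List.enumerate_cons, List.foldl_cons]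
    apply ih (s + 1)
    intro kv h
    have := pv_inner_inv s ln.toList 0 d (by
      intro kv hkv
      obtain ⟨h1, h2⟩ := hd kv hkv
      exact ⟨h1, fun p hp => h2 p hp⟩) kv h
    obtain ⟨h1, h2⟩ := this
    refine ⟨h1, fun p hp => pv_lex_mono (h2 p hp) (Or.inl (by omega))⟩

-- membership in find_antinodes (port A's per-pair set)
theorem pv_mem_find (a1 a2 : Int × Int) (mx my : Int) (p : Int × Int) :
    p ∈ pvFindAntinodes a1 a2 mx my ↔
      p = a1 ∨ p = a2 ∨
        (0 ≤ p.1 ∧ p.1 < mx ∧ 0 ≤ p.2 ∧ p.2 < my ∧ pvIsCollinear p a1 a2 = true) := by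
  unfold pvFindAntinodes
  have hinner : ∀ (y : Int) (s : List (Int × Int)) (q : Int × Int),
      q ∈ (PySem.List.pyRange 0 mx 1).foldl (fun antinodes x =>
        if (x, y) ≠ a1 ∧ (x, y) ≠ a2 then
          if pvIsCollinear (x, y) a1 a2 then PySem.Set.add antinodes (x, y) else antinodes
        else antinodes) s ↔
      q ∈ s ∨ ∃ x ∈ PySem.List.pyRange 0 mx 1,
        (((x, y) ≠ a1 ∧ (x, y) ≠ a2) ∧ pvIsCollinear (x, y) a1 a2 = true) ∧ q = (x, y) := by
    intro y s q
    refine pv_mem_foldl _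
      (fun x q => (((x, y) ≠ a1 ∧ (x, y) ≠ a2) ∧ pvIsCollinear (x, y) a1 a2 = true) ∧ q = (x, y))
      ?_ _ s q
    intro s' x q'
    split_ifs with h1 h2
    · rw [PySem.Set.mem_add]; constructor
      · rintro (h | h)
        · exact .inl h
        · exact .inr ⟨⟨h1, h2⟩, h⟩
      · rintro (h | ⟨_, h⟩)
        · exact .inl h
        · exact .inr h
    · constructor
      · exact .inl
      · rintro (h | ⟨⟨_, hc⟩, _⟩)
        · exact h
        · exact absurd hc (by simpa using h2)
    · constructor
      · exact .inl
      · rintro (h | ⟨⟨hc, _⟩, _⟩)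
        · exact h
        · exact absurd hc h1
  rw [pv_mem_foldl _
    (fun y q => ∃ x ∈ PySem.List.pyRange 0 mx 1,
        (((x, y) ≠ a1 ∧ (x, y) ≠ a2) ∧ pvIsCollinear (x, y) a1 a2 = true) ∧ q = (x, y))
    (fun s y q => hinner y s q)]
  have hinit : p ∈ PySem.Set.add (PySem.Set.add PySem.Set.empty a1) a2 ↔ p = a1 ∨ p = a2 := by
    rw [PySem.Set.mem_add, PySem.Set.mem_add]
    simp [PySem.Set.empty]
  rw [hinit]
  constructor
  · rintro ((h | h) | ⟨y, hy, x, hx, ⟨⟨hne1, hne2⟩, hc⟩, rfl⟩)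
    · exact .inl h
    · exact .inr (.inl h)
    · rw [PySem.List.mem_pyRange_one] at hx hy
      exact .inr (.inr ⟨hx.1, hx.2, hy.1, hy.2, hc⟩)
  · rintro (h | h | ⟨h1, h2, h3, h4, hc⟩)
    · exact .inl (.inl h)
    · exact .inl (.inr h)
    · by_cases e1 : p = a1
      · exact .inl (.inl e1)
      · by_cases e2 : p = a2
        · exact .inl (.inr e2)
        · refine .inr ⟨p.2, ?_, p.1, ?_, ⟨⟨?_, ?_⟩, ?_⟩, ?_⟩
          · rw [PySem.List.mem_pyRange_one]; exact ⟨h3, h4⟩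
          · rw [PySem.List.mem_pyRange_one]; exact ⟨h1, h2⟩
          · simpa using e1
          · simpa using e2
          · simpa using hc
          · simp

-- the per-pair sets of A and B contain the same points
theorem pv_pair_iff (ax ay bx b2y mx my : Int) (hmx : 0 ≤ mx) (hmy : 0 ≤ my)
    (hab : ¬(ax = bx ∧ ay = b2y)) (p : Int × Int) :
    (p = (ax, ay) ∨ p = (bx, b2y) ∨
      (0 ≤ p.1 ∧ p.1 < mx ∧ 0 ≤ p.2 ∧ p.2 < my ∧
        pvIsCollinear p (ax, ay) (bx, b2y) = true)) ↔
    (p = (ax, ay) ∨ p = (bx, b2y) ∨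
      ∃ k ∈ PySem.List.pyRange (pvClip ay (PySem.Int.floordiv (b2y - ay) (pvGcd (bx - ax) (b2y - ay))) my (pvClip ax (PySem.Int.floordiv (bx - ax) (pvGcd (bx - ax) (b2y - ay))) mx (-(mx + my + |ax| + |ay|)) (mx + my + |ax| + |ay|)).1 (pvClip ax (PySem.Int.floordiv (bx - ax) (pvGcd (bx - ax) (b2y - ay))) mx (-(mx + my + |ax| + |ay|)) (mx + my + |ax| + |ay|)).2).1 ((pvClip ay (PySem.Int.floordiv (b2y - ay) (pvGcd (bx - ax) (b2y - ay))) my (pvClip ax (PySem.Int.floordiv (bx - ax) (pvGcd (bx - ax) (b2y - ay))) mx (-(mx + my + |ax| + |ay|)) (mx + my + |ax| + |ay|)).1 (pvClip ax (PySem.Int.floordiv (bx - ax) (pvGcd (bx - ax) (b2y - ay))) mx (-(mx + my + |ax| + |ay|)) (mx + my + |ax| + |ay|)).2).2 + 1) 1,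
        (0 ≤ ax + k * PySem.Int.floordiv (bx - ax) (pvGcd (bx - ax) (b2y - ay)) ∧
         ax + k * PySem.Int.floordiv (bx - ax) (pvGcd (bx - ax) (b2y - ay)) < mx ∧
         0 ≤ ay + k * PySem.Int.floordiv (b2y - ay) (pvGcd (bx - ax) (b2y - ay)) ∧
         ay + k * PySem.Int.floordiv (b2y - ay) (pvGcd (bx - ax) (b2y - ay)) < my) ∧
        p = (ax + k * PySem.Int.floordiv (bx - ax) (pvGcd (bx - ax) (b2y - ay)),
             ay + k * PySem.Int.floordiv (b2y - ay) (pvGcd (bx - ax) (b2y - ay)))) := by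
  have hne : ¬(bx - ax = 0 ∧ b2y - ay = 0) := by
    intro ⟨h1, h2⟩; exact hab ⟨by omega, by omega⟩
  obtain ⟨hg, hdx, hdy, hcop⟩ := pv_core (bx - ax) (b2y - ay) hne
  set ux := PySem.Int.floordiv (bx - ax) (pvGcd (bx - ax) (b2y - ay)) with hux
  set uy := PySem.Int.floordiv (b2y - ay) (pvGcd (bx - ax) (b2y - ay)) with huy
  have hune : ¬(ux = 0 ∧ uy = 0) := by
    rintro ⟨h1, h2⟩
    apply hne
    constructor
    · rw [hdx, h1]; ring
    · rw [hdy, h2]; ring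
  refine or_congr_right (or_congr_right ?_)
  obtain ⟨px, py⟩ := p
  simp only
  constructor
  · rintro ⟨h1, h2, h3, h4, hc⟩
    rw [pv_coll_iff] at hc
    obtain ⟨k, hX, hY⟩ := (pv_param (bx - ax) (b2y - ay) (px - ax) (py - ay) hne).mp
      (by linarith [hc])
    have hpx : px = ax + k * ux := by linarith [hX]
    have hpy : py = ay + k * uy := by linarith [hY]
    refine ⟨k, ?_, ⟨?_, ?_, ?_, ?_⟩, ?_⟩
    · have hb := pv_k_bound mx my ax ay ux uy k hmy hmx hune
        (by linarith) (by linarith) (by linarith) (by linarith)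
      have hcx := pv_clip_le ax ux mx (-(mx + my + |ax| + |ay|)) (mx + my + |ax| + |ay|) k
        (by linarith) (by linarith) hb.1 (by linarith [hb.2])
      have hcy := pv_clip_le ay uy my
        (pvClip ax ux mx (-(mx + my + |ax| + |ay|)) (mx + my + |ax| + |ay|)).1
        (pvClip ax ux mx (-(mx + my + |ax| + |ay|)) (mx + my + |ax| + |ay|)).2 k
        (by linarith) (by linarith) hcx.1 hcx.2
      rw [PySem.List.mem_pyRange_one]
      exact ⟨hcy.1, by linarith [hcy.2]⟩
    · linarith
    · linarith
    · linarith
    · linarith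
    · rw [hpx, hpy]
  · rintro ⟨k, hk, ⟨h1, h2, h3, h4⟩, heq⟩
    have hpx : px = ax + k * ux := by injection heq
    have hpy : py = ay + k * uy := by injection heq with e1 e2
    refine ⟨by linarith, by linarith, by linarith, by linarith, ?_⟩
    rw [pv_coll_iff]
    have := (pv_param (bx - ax) (b2y - ay) (px - ax) (py - ay) hne).mpr
      ⟨k, by linarith, by linarith⟩
    linarith [this]

theorem pv_lex_ne {p q : Int × Int} (h : pvLex p q) : p ≠ q := by
  obtain ⟨a, b⟩ := p; obtain ⟨c, d⟩ := q
  unfold pvLex at h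
  simp only at h
  simp only [ne_eq, Prod.mk.injEq, not_and]
  omega

-- membership in A's accumulated set
theorem pv_memA (antennas : PySem.Dict Char (List (Int × Int))) (mx my : Int) (p : Int × Int) :
    p ∈ (antennas.items.foldl (fun all_antinodes fp =>
      if PySem.List.len fp.2 < 2 then all_antinodes
      else (PySem.List.combinations fp.2 2).foldl (fun all_antinodes pair =>
        pvPairLoopA mx my all_antinodes pair) all_antinodes) (PySem.Set.empty : PySem.Set (Int × Int))) ↔
    ∃ kv ∈ antennas.items, ¬ (PySem.List.len kv.2 < 2) ∧
      ∃ pair ∈ PySem.List.combinations kv.2 2, ∃ a1 a2, pair = [a1, a2] ∧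
        p ∈ pvFindAntinodes a1 a2 mx my := by
  rw [pv_mem_foldl _
    (fun kv q => ¬ (PySem.List.len kv.2 < 2) ∧
      ∃ pair ∈ PySem.List.combinations kv.2 2, ∃ a1 a2, pair = [a1, a2] ∧
        q ∈ pvFindAntinodes a1 a2 mx my) ?_ antennas.items PySem.Set.empty p]
  · simp [PySem.Set.empty]
  · intro s kv q
    by_cases hl : PySem.List.len kv.2 < 2
    · rw [if_pos hl]
      constructor
      · exact .inl
      · rintro (h | ⟨hn, _⟩)
        · exact h
        · exact absurd hl hn
    · rw [if_neg hl]
      rw [pv_mem_foldl _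
        (fun pair q => ∃ a1 a2, pair = [a1, a2] ∧ q ∈ pvFindAntinodes a1 a2 mx my)
        ?_ _ s q]
      · constructor
        · rintro (h | h)
          · exact .inl h
          · exact .inr ⟨hl, h⟩
        · rintro (h | ⟨_, h⟩)
          · exact .inl h
          · exact .inr h
      · intro s' pair q'
        rcases pair with _ | ⟨a1, _ | ⟨a2, _ | ⟨a3, t⟩⟩⟩
        · simp [pvPairLoopA]
        · simp [pvPairLoopA]
        · simp only [pvPairLoopA]
          rw [PySem.Set.mem_update]
          constructor
          · rintro (h | h)
            · exact .inl h
            · exact .inr ⟨a1, a2, rfl, h⟩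
          · rintro (h | ⟨a1', a2', heq, h⟩)
            · exact .inl h
            · simp only [List.cons.injEq, and_true] at heq
              obtain ⟨e1, e2⟩ := heq
              subst e1; subst e2
              exact .inr h
        · simp [pvPairLoopA]

-- membership in B's accumulated set
theorem pv_memB (antennas : PySem.Dict Char (List (Int × Int))) (mx my : Int) (p : Int × Int) :
    p ∈ (antennas.values.foldl (fun found positions =>
      (PySem.List.combinations positions 2).foldl (fun found pair =>
        pvPairLoopB mx my found pair) found) (PySem.Set.empty : PySem.Set (Int × Int))) ↔
    ∃ kv ∈ antennas.items, ∃ pair ∈ PySem.List.combinations kv.2 2,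
      ∃ ax ay bx b2y, pair = [(ax, ay), (bx, b2y)] ∧
        (p = (ax, ay) ∨ p = (bx, b2y) ∨
          ∃ k ∈ PySem.List.pyRange (pvClip ay (PySem.Int.floordiv (b2y - ay) (pvGcd (bx - ax) (b2y - ay))) my (pvClip ax (PySem.Int.floordiv (bx - ax) (pvGcd (bx - ax) (b2y - ay))) mx (-(mx + my + |ax| + |ay|)) (mx + my + |ax| + |ay|)).1 (pvClip ax (PySem.Int.floordiv (bx - ax) (pvGcd (bx - ax) (b2y - ay))) mx (-(mx + my + |ax| + |ay|)) (mx + my + |ax| + |ay|)).2).1 ((pvClip ay (PySem.Int.floordiv (b2y - ay) (pvGcd (bx - ax) (b2y - ay))) my (pvClip ax (PySem.Int.floordiv (bx - ax) (pvGcd (bx - ax) (b2y - ay))) mx (-(mx + my + |ax| + |ay|)) (mx + my + |ax| + |ay|)).1 (pvClip ax (PySem.Int.floordiv (bx - ax) (pvGcd (bx - ax) (b2y - ay))) mx (-(mx + my + |ax| + |ay|)) (mx + my + |ax| + |ay|)).2).2 + 1) 1,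
            (0 ≤ ax + k * PySem.Int.floordiv (bx - ax) (pvGcd (bx - ax) (b2y - ay)) ∧
             ax + k * PySem.Int.floordiv (bx - ax) (pvGcd (bx - ax) (b2y - ay)) < mx ∧
             0 ≤ ay + k * PySem.Int.floordiv (b2y - ay) (pvGcd (bx - ax) (b2y - ay)) ∧
             ay + k * PySem.Int.floordiv (b2y - ay) (pvGcd (bx - ax) (b2y - ay)) < my) ∧
            p = (ax + k * PySem.Int.floordiv (bx - ax) (pvGcd (bx - ax) (b2y - ay)),
                 ay + k * PySem.Int.floordiv (b2y - ay) (pvGcd (bx - ax) (b2y - ay)))) := by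
  unfold PySem.Dict.values
  rw [List.foldl_map]
  rw [pv_mem_foldl _
    (fun kv q => ∃ pair ∈ PySem.List.combinations kv.2 2,
      ∃ ax ay bx b2y, pair = [(ax, ay), (bx, b2y)] ∧
        (q = (ax, ay) ∨ q = (bx, b2y) ∨
          ∃ k ∈ PySem.List.pyRange (pvClip ay (PySem.Int.floordiv (b2y - ay) (pvGcd (bx - ax) (b2y - ay))) my (pvClip ax (PySem.Int.floordiv (bx - ax) (pvGcd (bx - ax) (b2y - ay))) mx (-(mx + my + |ax| + |ay|)) (mx + my + |ax| + |ay|)).1 (pvClip ax (PySem.Int.floordiv (bx - ax) (pvGcd (bx - ax) (b2y - ay))) mx (-(mx + my + |ax| + |ay|)) (mx + my + |ax| + |ay|)).2).1 ((pvClip ay (PySem.Int.floordiv (b2y - ay) (pvGcd (bx - ax) (b2y - ay))) my (pvClip ax (PySem.Int.floordiv (bx - ax) (pvGcd (bx - ax) (b2y - ay))) mx (-(mx + my + |ax| + |ay|)) (mx + my + |ax| + |ay|)).1 (pvClip ax (PySem.Int.floordiv (bx - ax) (pvGcd (bx - ax) (b2y - ay))) mx (-(mx + my + |ax| + |ay|))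 (mx + my + |ax| + |ay|)).2).2 + 1) 1,
            (0 ≤ ax + k * PySem.Int.floordiv (bx - ax) (pvGcd (bx - ax) (b2y - ay)) ∧
             ax + k * PySem.Int.floordiv (bx - ax) (pvGcd (bx - ax) (b2y - ay)) < mx ∧
             0 ≤ ay + k * PySem.Int.floordiv (b2y - ay) (pvGcd (bx - ax) (b2y - ay)) ∧
             ay + k * PySem.Int.floordiv (b2y - ay) (pvGcd (bx - ax) (b2y - ay)) < my) ∧
            q = (ax + k * PySem.Int.floordiv (bx - ax) (pvGcd (bx - ax) (b2y - ay)),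
                 ay + k * PySem.Int.floordiv (b2y - ay) (pvGcd (bx - ax) (b2y - ay)))))
    ?_ antennas.items PySem.Set.empty p]
  · simp [PySem.Set.empty]
  · intro s kv q
    rw [pv_mem_foldl _
      (fun pair q => ∃ ax ay bx b2y, pair = [(ax, ay), (bx, b2y)] ∧
        (q = (ax, ay) ∨ q = (bx, b2y) ∨
          ∃ k ∈ PySem.List.pyRange (pvClip ay (PySem.Int.floordiv (b2y - ay) (pvGcd (bx - ax) (b2y - ay))) my (pvClip ax (PySem.Int.floordiv (bx - ax) (pvGcd (bx - ax) (b2y - ay))) mx (-(mx + my + |ax| + |ay|)) (mx + my + |ax| + |ay|)).1 (pvClip ax (PySem.Int.floordiv (bx - ax) (pvGcd (bx - ax) (b2y - ay))) mx (-(mx + my + |ax| + |ay|)) (mx + my + |ax| + |ay|)).2).1 ((pvClip ay (PySem.Int.floordiv (b2y - ay) (pvGcd (bx - ax) (b2y - ay))) my (pvClip ax (PySem.Int.floordiv (bx - ax) (pvGcd (bx - ax) (b2y - ay))) mx (-(mx + my + |ax| + |ay|)) (mx + my + |ax| + |ay|)).1 (pvClip ax (PySem.Int.floordiv (bx - ax)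 (pvGcd (bx - ax) (b2y - ay))) mx (-(mx + my + |ax| + |ay|)) (mx + my + |ax| + |ay|)).2).2 + 1) 1,
            (0 ≤ ax + k * PySem.Int.floordiv (bx - ax) (pvGcd (bx - ax) (b2y - ay)) ∧
             ax + k * PySem.Int.floordiv (bx - ax) (pvGcd (bx - ax) (b2y - ay)) < mx ∧
             0 ≤ ay + k * PySem.Int.floordiv (b2y - ay) (pvGcd (bx - ax) (b2y - ay)) ∧
             ay + k * PySem.Int.floordiv (b2y - ay) (pvGcd (bx - ax) (b2y - ay)) < my) ∧
            q = (ax + k * PySem.Int.floordiv (bx - ax) (pvGcd (bx - ax) (b2y - ay)),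
                 ay + k * PySem.Int.floordiv (b2y - ay) (pvGcd (bx - ax) (b2y - ay)))))
      ?_ _ s q]
    intro s' pair q'
    rcases pair with _ | ⟨⟨ax, ay⟩, _ | ⟨⟨bx, b2y⟩, _ | ⟨a3, t⟩⟩⟩
    · simp [pvPairLoopB]
    · simp [pvPairLoopB]
    · simp only [pvPairLoopB]
      rw [pv_mem_foldl _
        (fun k q => (0 ≤ ax + k * PySem.Int.floordiv (bx - ax) (pvGcd (bx - ax) (b2y - ay)) ∧
             ax + k * PySem.Int.floordiv (bx - ax) (pvGcd (bx - ax) (b2y - ay)) < mx ∧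
             0 ≤ ay + k * PySem.Int.floordiv (b2y - ay) (pvGcd (bx - ax) (b2y - ay)) ∧
             ay + k * PySem.Int.floordiv (b2y - ay) (pvGcd (bx - ax) (b2y - ay)) < my) ∧
            q = (ax + k * PySem.Int.floordiv (bx - ax) (pvGcd (bx - ax) (b2y - ay)),
                 ay + k * PySem.Int.floordiv (b2y - ay) (pvGcd (bx - ax) (b2y - ay))))
        ?_ _ _ q']
      · rw [PySem.Set.mem_add, PySem.Set.mem_add]
        constructor
        · rintro (((h | h) | h) | h)
          · exact .inl h
          · exact .inr ⟨ax, ay, bx, b2y, rfl, .inl h⟩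
          · exact .inr ⟨ax, ay, bx, b2y, rfl, .inr (.inl h)⟩
          · exact .inr ⟨ax, ay, bx, b2y, rfl, .inr (.inr h)⟩
        · rintro (h | ⟨ax', ay', bx', b2y', heq, hd⟩)
          · exact .inl (.inl (.inl h))
          · simp only [List.cons.injEq, Prod.mk.injEq, and_true] at heq
            obtain ⟨⟨e1, e2⟩, e3, e4⟩ := heq
            subst e1; subst e2; subst e3; subst e4
            rcases hd with h | h | h
            · exact .inl (.inl (.inr h))
            · exact .inl (.inr h)
            · exact .inr h
      · intro s'' k q''
        split_ifs with hc
        · rw [PySem.Set.mem_add]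
          constructor
          · rintro (h | h)
            · exact .inl h
            · exact .inr ⟨hc, h⟩
          · rintro (h | ⟨_, h⟩)
            · exact .inl h
            · exact .inr h
        · constructor
          · exact .inl
          · rintro (h | ⟨hc', _⟩)
            · exact h
            · exact absurd hc' hc
    · simp [pvPairLoopB]

-- per-frequency: A's guarded pair loop and B's pair loop contribute the same points
theorem pv_kv_iff (mx my : Int) (hmx : 0 ≤ mx) (hmy : 0 ≤ my)
    (l : List (Int × Int)) (hnd : l.Nodup) (p : Int × Int) :
    (¬ (PySem.List.len l < 2) ∧
      ∃ pair ∈ PySem.List.combinations l 2, ∃ a1 a2, pair = [a1, a2] ∧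
        p ∈ pvFindAntinodes a1 a2 mx my) ↔
    (∃ pair ∈ PySem.List.combinations l 2,
      ∃ ax ay bx b2y, pair = [(ax, ay), (bx, b2y)] ∧
        (p = (ax, ay) ∨ p = (bx, b2y) ∨
          ∃ k ∈ PySem.List.pyRange (pvClip ay (PySem.Int.floordiv (b2y - ay) (pvGcd (bx - ax) (b2y - ay))) my (pvClip ax (PySem.Int.floordiv (bx - ax) (pvGcd (bx - ax) (b2y - ay))) mx (-(mx + my + |ax| + |ay|)) (mx + my + |ax| + |ay|)).1 (pvClip ax (PySem.Int.floordiv (bx - ax) (pvGcd (bx - ax) (b2y - ay))) mx (-(mx + my + |ax| + |ay|)) (mx + my + |ax| + |ay|)).2).1 ((pvClip ay (PySem.Int.floordiv (b2y - ay) (pvGcd (bx - ax) (b2y - ay))) my (pvClip ax (PySem.Int.floordiv (bx - ax) (pvGcd (bx - ax) (b2y - ay))) mx (-(mx + my + |ax| + |ay|)) (mx + my + |ax| + |ay|)).1 (pvClip ax (PySem.Int.floordiv (bx - ax) (pvGcd (bx - ax) (b2y - ay))) mx (-(mx + my + |ax| + |ay|)) (mx + my + |ax| + |ay|)).2).2 +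 1) 1,
            (0 ≤ ax + k * PySem.Int.floordiv (bx - ax) (pvGcd (bx - ax) (b2y - ay)) ∧
             ax + k * PySem.Int.floordiv (bx - ax) (pvGcd (bx - ax) (b2y - ay)) < mx ∧
             0 ≤ ay + k * PySem.Int.floordiv (b2y - ay) (pvGcd (bx - ax) (b2y - ay)) ∧
             ay + k * PySem.Int.floordiv (b2y - ay) (pvGcd (bx - ax) (b2y - ay)) < my) ∧
            p = (ax + k * PySem.Int.floordiv (bx - ax) (pvGcd (bx - ax) (b2y - ay)),
                 ay + k * PySem.Int.floordiv (b2y - ay) (pvGcd (bx - ax) (b2y - ay))))) := by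
  rw [PySem.List.len_eq]
  by_cases hl : l.length < 2
  · rw [PySem.List.combinations_eq_nil_of_length_lt l hl]
    constructor
    · rintro ⟨hn, _⟩; exact absurd (by exact_mod_cast hl) hn
    · rintro ⟨pair, hpair, _⟩; simp at hpair
  · have hlen : ¬ ((l.length : Int) < 2) := by exact_mod_cast hl
    constructor
    · rintro ⟨_, pair, hpair, a1, a2, heq, hmem⟩
      have hsub := (PySem.List.mem_combinations_iff l 2 pair).mp hpair
      have hpnd : pair.Nodup := hsub.1.nodup hnd
      subst heq
      obtain ⟨ax, ay⟩ := a1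
      obtain ⟨bx, b2y⟩ := a2
      have hab : ¬ (ax = bx ∧ ay = b2y) := by
        rintro ⟨rfl, rfl⟩
        simp at hpnd
      rw [pv_mem_find] at hmem
      refine ⟨[(ax, ay), (bx, b2y)], hpair, ax, ay, bx, b2y, rfl, ?_⟩
      exact (pv_pair_iff ax ay bx b2y mx my hmx hmy hab p).mp hmem
    · rintro ⟨pair, hpair, ax, ay, bx, b2y, heq, hd⟩
      have hsub := (PySem.List.mem_combinations_iff l 2 pair).mp hpair
      have hpnd : pair.Nodup := hsub.1.nodup hnd
      subst heq
      have hab : ¬ (ax = bx ∧ ay = b2y) := by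
        rintro ⟨rfl, rfl⟩
        simp at hpnd
      refine ⟨hlen, [(ax, ay), (bx, b2y)], hpair, (ax, ay), (bx, b2y), rfl, ?_⟩
      rw [pv_mem_find]
      exact (pv_pair_iff ax ay bx b2y mx my hmx hmy hab p).mpr hd

-- the whole accumulation: same member set, both duplicate-free, hence equal size
theorem pv_main (antennas : PySem.Dict Char (List (Int × Int))) (mx my : Int)
    (hmx : 0 ≤ mx) (hmy : 0 ≤ my) (hnd : ∀ kv ∈ antennas.items, kv.2.Nodup) :
    PySem.Set.len (antennas.items.foldl (fun all_antinodes fp =>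
      if PySem.List.len fp.2 < 2 then all_antinodes
      else (PySem.List.combinations fp.2 2).foldl (fun all_antinodes pair =>
        pvPairLoopA mx my all_antinodes pair) all_antinodes) (PySem.Set.empty : PySem.Set (Int × Int))) =
    PySem.Set.len (antennas.values.foldl (fun found positions =>
      (PySem.List.combinations positions 2).foldl (fun found pair =>
        pvPairLoopB mx my found pair) found) (PySem.Set.empty : PySem.Set (Int × Int))) := by
  have hndA : (antennas.items.foldl (fun all_antinodes fp =>
      if PySem.List.len fp.2 < 2 then all_antinodes
      else (PySem.List.combinations fp.2 2).foldl (fun all_antinodes pair =>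
        pvPairLoopA mx my all_antinodes pair) all_antinodes) (PySem.Set.empty : PySem.Set (Int × Int))).Nodup := by
    apply pv_nodup_foldl
    · intro s fp hs
      dsimp only
      split
      · exact hs
      · apply pv_nodup_foldl
        · intro s' pair hs'
          rcases pair with _ | ⟨a1, _ | ⟨a2, _ | ⟨a3, t⟩⟩⟩
          · exact hs'
          · exact hs'
          · exact PySem.Set.nodup_update _ _ hs'
          · exact hs'
        · exact hs
    · simp [PySem.Set.empty]
  have hndB : (antennas.values.foldl (fun found positions =>
      (PySem.List.combinations positions 2).foldl (fun found pair =>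
        pvPairLoopB mx my found pair) found) (PySem.Set.empty : PySem.Set (Int × Int))).Nodup := by
    apply pv_nodup_foldl
    · intro s positions hs
      dsimp only
      apply pv_nodup_foldl
      · intro s' pair hs'
        rcases pair with _ | ⟨⟨ax, ay⟩, _ | ⟨⟨bx, b2y⟩, _ | ⟨a3, t⟩⟩⟩
        · exact hs'
        · exact hs'
        · simp only [pvPairLoopB]
          apply pv_nodup_foldl
          · intro s'' k hs''
            dsimp only
            split
            · exact PySem.Set.nodup_add _ _ hs''
            · exact hs''
          · exact PySem.Set.nodup_add _ _ (PySem.Set.nodup_add _ _ hs')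
        · exact hs'
      · exact hs
    · simp [PySem.Set.empty]
  have hmem : ∀ q, q ∈ (antennas.items.foldl (fun all_antinodes fp =>
      if PySem.List.len fp.2 < 2 then all_antinodes
      else (PySem.List.combinations fp.2 2).foldl (fun all_antinodes pair =>
        pvPairLoopA mx my all_antinodes pair) all_antinodes) (PySem.Set.empty : PySem.Set (Int × Int))) ↔
      q ∈ (antennas.values.foldl (fun found positions =>
      (PySem.List.combinations positions 2).foldl (fun found pair =>
        pvPairLoopB mx my found pair) found) (PySem.Set.empty : PySem.Set (Int × Int))) := by
    intro q
    rw [pv_memA, pv_memB]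
    constructor
    · rintro ⟨kv, hkv, h⟩
      exact ⟨kv, hkv, (pv_kv_iff mx my hmx hmy kv.2 (hnd kv hkv) q).mp h⟩
    · rintro ⟨kv, hkv, h⟩
      exact ⟨kv, hkv, (pv_kv_iff mx my hmx hmy kv.2 (hnd kv hkv) q).mpr h⟩
  have hperm := (List.perm_ext_iff_of_nodup hndA hndB).mpr hmem
  unfold PySem.Set.len
  exact_mod_cast hperm.length_eq

-- ===== VERDICT (by name: the statement is the Claim_ definition above) =====
theorem solve_spec : Claim_equal_solve := by
  intro input_text _
  show solve input_text = solve_alt input_text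
  simp only [solve, solve_alt, pvParseGrid]
  apply pv_main
  · rw [PySem.Str.len_eq]; exact Int.natCast_nonneg _
  · rw [PySem.List.len_eq]; exact Int.natCast_nonneg _
  · intro kv hkv
    have hpw := pv_parse_pairwise _ 0 PySem.Dict.empty
      (by intro kv h; simp [PySem.Dict.empty] at h) kv hkv
    exact List.Pairwise.imp (fun h => pv_lex_ne h) hpw
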